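-- pv_equiv track=rewrite | github.com/neubig/nlp | datasets/glad/glad.py | conll_iterator
-- ===== SOURCE A (Python) =====
-- def conll_iterator(stream, separator=' '):
--     curr_list = list()
--     for line in stream:
--         line = line.strip()
--         if line.startswith("-DOCSTART-") or line == "" or line == "\n":
--             if len(curr_list):
--                 yield curr_list
--             curr_list = list()
--         else:
--             curr_list.append(line.split(separator))
--     if len(curr_list):
--         yield curr_list
-- ===== SOURCE B (Python) =====
-- def conll_iterator(stream, separator=' '):
--     # Strip once, precompute a separator-line table, then emit each maximal
--     # run of content lines found by a two-pointer index scan.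
--     lines = [line.strip() for line in stream]
--     sep_at = [l.startswith("-DOCSTART-") or l == "" for l in lines]
--     n = len(lines)
--     i = 0
--     while i < n:
--         if sep_at[i]:
--             i += 1
--         else:
--             j = i
--             while j < n and not sep_at[j]:
--                 j += 1
--             yield [l.split(separator) for l in lines[i:j]]
--             i = j
-- ===== Notes on version B (the rewrite author's own statement) =====
-- stated objective: alternative
-- what changed: Replaces the accumulator-with-reset-and-trailing-flush loop by a precomputed separator-line table plus a two-pointer index scan that slices out each maximal run of content lines; Pre_ excludes only separator = '' with a content line present, where both versions raise ValueError from str.split('').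
import Mathlib
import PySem

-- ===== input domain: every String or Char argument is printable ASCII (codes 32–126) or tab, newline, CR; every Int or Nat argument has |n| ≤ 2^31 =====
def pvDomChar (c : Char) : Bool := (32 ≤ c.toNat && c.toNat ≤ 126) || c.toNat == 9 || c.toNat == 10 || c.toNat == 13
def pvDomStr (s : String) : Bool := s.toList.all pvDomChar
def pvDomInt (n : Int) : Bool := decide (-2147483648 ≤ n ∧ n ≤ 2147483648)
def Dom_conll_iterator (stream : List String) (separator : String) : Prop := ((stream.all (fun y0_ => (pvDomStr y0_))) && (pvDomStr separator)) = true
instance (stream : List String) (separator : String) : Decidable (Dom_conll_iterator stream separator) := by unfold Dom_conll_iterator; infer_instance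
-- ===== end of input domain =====

-- B changes the shape of the loop (separator table + two-pointer index scan instead of an
-- accumulator with reset and trailing flush); same task, same cost; Pre_ excludes only the
-- inputs (empty separator with a content line) where the Python raises ValueError.

-- ===== PORT A =====
-- line.split(separator): split? is none exactly when separator = "" (Python's ValueError);
-- that case is excluded by Pre_, the .getD [] is never what the claim is about there.
def pvSplitA (separator line : String) : List String :=
  (PySem.Str.split? line separator).getD []

-- the generator's for-loop: state is curr_list; a yield prepends to the remaining output
def pvALoop (separator : String) (stream : List String) (curr : List (List String)) :
    List (List (List String)) :=
  match stream with
  | [] => if curr.length ≠ 0 then [curr] else []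
  | line :: rest =>
    let l := PySem.Str.strip line
    if PySem.Str.startswith l "-DOCSTART-" || l == "" || l == "\n" then
      (if curr.length ≠ 0 then [curr] else []) ++ pvALoop separator rest []
    else
      pvALoop separator rest (curr ++ [pvSplitA separator l])

def conll_iterator (stream : List String) (separator : String) : List (List (List String)) :=
  pvALoop separator stream []

-- ===== PORT B =====
def pvIsSep (l : String) : Bool := PySem.Str.startswith l "-DOCSTART-" || l == ""

-- inner while: j = i; while j < n and not sep_at[j]: j += 1
def pvBFind (sepAt : List Bool) (n j : Nat) : Nat :=
  if h : j < n ∧ sepAt.getD j true = false then pvBFind sepAt n (j + 1) else j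
  termination_by n - j

theorem pvBFind_ge (sepAt : List Bool) (n j : Nat) : j ≤ pvBFind sepAt n j := by
  fun_induction pvBFind sepAt n j with
  | case1 j h ih => omega
  | case2 j h => omega

-- outer while over the index i
def pvBLoop (separator : String) (lines : List String) (sepAt : List Bool) (n i : Nat) :
    List (List (List String)) :=
  if hi : i < n then
    if sepAt.getD i true then
      pvBLoop separator lines sepAt n (i + 1)
    else
      let j := pvBFind sepAt n i
      (PySem.List.slice lines (some (i : Int)) (some (j : Int))).map
          (fun l => (PySem.Str.split? l separator).getD [])
        :: pvBLoop separator lines sepAt n j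
  else []
  termination_by n - i
  decreasing_by
  · omega
  · have h1 : i + 1 ≤ pvBFind sepAt n (i + 1) := pvBFind_ge sepAt n (i + 1)
    have h2 : pvBFind sepAt n i = pvBFind sepAt n (i + 1) := by
      rw [pvBFind]; simp_all
    omega

def conll_iterator_alt (stream : List String) (separator : String) : List (List (List String)) :=
  let lines := stream.map PySem.Str.strip
  let sepAt := lines.map pvIsSep
  pvBLoop separator lines sepAt lines.length 0

-- ===== PRECONDITION & SPEC =====
-- Pre_ excludes exactly the inputs where Python A raises (ValueError from split('')):
-- separator = "" together with at least one content (non-separator) line.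
def Pre_conll_iterator (stream : List String) (separator : String) : Prop :=
  separator ≠ "" ∨ ∀ l ∈ stream,
    (PySem.Str.startswith (PySem.Str.strip l) "-DOCSTART-" || PySem.Str.strip l == "") = true

instance (stream : List String) (separator : String) : Decidable (Pre_conll_iterator stream separator) := by
  unfold Pre_conll_iterator; infer_instance

def pvWitness_conll_iterator : List String × String := (["a b", "  ", "c d", "-DOCSTART- x", "e f"], " ")

def Spec_conll_iterator (stream : List String) (separator : String) (out : List (List (List String))) : Prop := out = conll_iterator_alt stream separator
instance (stream : List String) (separator : String) (out : List (List (List String))) : Decidable (Spec_conll_iterator stream separator out) := by unfold Spec_conll_iterator; infer_instance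

-- ===== CLAIM (what is proved, stated in full; the proofs are below) =====
def Claim_equal_conll_iterator : Prop := ∀ (stream : List String) (separator : String), Dom_conll_iterator stream separator → Pre_conll_iterator stream separator → Spec_conll_iterator stream separator (conll_iterator stream separator)


-- ===== LEMMAS AND PROOFS =====

-- proof-layer middle form: span/group recursion over the stripped lines
def pvSGroups (separator : String) : List String → List (List (List String))
  | [] => []
  | l :: ls =>
    if pvIsSep l then pvSGroups separator ls
    else
      ((l :: ls).takeWhile (fun x => !pvIsSep x)).map (pvSplitA separator)
        :: pvSGroups separator ((l :: ls).dropWhile (fun x => !pvIsSep x))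
  termination_by ls => ls.length
  decreasing_by
  · simp
  · have hl : (!pvIsSep l) = true := by simp_all
    rw [List.dropWhile_cons, if_pos hl]
    exact Nat.lt_succ_of_le (List.length_dropWhile_le _ _)

theorem pvSGroups_nil (separator : String) : pvSGroups separator [] = [] := by
  rw [pvSGroups]

theorem pvSGroups_cons_sep (separator l : String) (ls : List String) (h : pvIsSep l = true) :
    pvSGroups separator (l :: ls) = pvSGroups separator ls := by
  rw [pvSGroups, if_pos h]

theorem pvSGroups_cons_content (separator l : String) (ls : List String) (h : pvIsSep l = false) :
    pvSGroups separator (l :: ls) =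
      ((l :: ls).takeWhile (fun x => !pvIsSep x)).map (pvSplitA separator)
        :: pvSGroups separator ((l :: ls).dropWhile (fun x => !pvIsSep x)) := by
  rw [pvSGroups, if_neg (by simp [h])]

-- pending accumulator, as it contributes to the rest of A's output
def pvPend (separator : String) (curr : List (List String)) (ls : List String) :
    List (List (List String)) :=
  match curr with
  | [] => pvSGroups separator ls
  | c :: cs =>
    ((c :: cs) ++ (ls.takeWhile (fun x => !pvIsSep x)).map (pvSplitA separator))
      :: pvSGroups separator (ls.dropWhile (fun x => !pvIsSep x))

-- str.strip never returns "\n" (it removes trailing/leading whitespace)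
theorem pvStrip_ne_newline (s : String) : (PySem.Str.strip s == "\n") = false := by
  rw [beq_eq_false_iff_ne]
  intro h
  have h' : (PySem.Str.strip s).toList = ['\n'] := by rw [h]; rfl
  rw [PySem.Str.toList_strip] at h'
  unfold PySem.Chars.strip PySem.Chars.rstrip PySem.Chars.lstrip at h'
  set t := List.dropWhile PySem.Chars.isspace
      (List.dropWhile PySem.Chars.isspace s.toList).reverse with ht
  have htval : t = ['\n'] := by
    have := congrArg List.reverse h'; simpa using this
  have hhead : t.head? = some '\n' := by rw [htval]; rfl
  have hnot : ¬ PySem.Chars.isspace '\n' = true := by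
    have := List.head?_dropWhile_not PySem.Chars.isspace
        (List.dropWhile PySem.Chars.isspace s.toList).reverse
    rw [← ht, hhead] at this
    simpa using this
  simp [PySem.Chars.isspace] at hnot

-- A's triple condition on a stripped line is exactly pvIsSep
theorem pvCond_eq (line : String) :
    (PySem.Str.startswith (PySem.Str.strip line) "-DOCSTART-" || PySem.Str.strip line == "" ||
      PySem.Str.strip line == "\n") = pvIsSep (PySem.Str.strip line) := by
  unfold pvIsSep
  rw [pvStrip_ne_newline]
  simp

-- A's loop in terms of the span form
theorem pvALoop_eq (separator : String) (stream : List String) (curr : List (List String)) :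
    pvALoop separator stream curr = pvPend separator curr (stream.map PySem.Str.strip) := by
  induction stream generalizing curr with
  | nil =>
    cases curr with
    | nil => simp [pvALoop, pvPend, pvSGroups]
    | cons c cs => simp [pvALoop, pvPend, pvSGroups]
  | cons line rest ih =>
    rw [pvALoop]
    simp only [List.map_cons]
    rw [pvCond_eq]
    by_cases hsep : pvIsSep (PySem.Str.strip line) = true
    · rw [if_pos hsep, ih []]
      cases curr with
      | nil =>
        simp only [List.length_nil, ne_eq, not_true_eq_false, if_false, List.nil_append, pvPend]
        rw [pvSGroups_cons_sep _ _ _ hsep]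
      | cons c cs =>
        simp only [List.length_cons, pvPend]
        rw [if_pos (by omega)]
        have h1 : List.takeWhile (fun x => !pvIsSep x)
            (PySem.Str.strip line :: List.map PySem.Str.strip rest) = [] := by
          simp [List.takeWhile_cons, hsep]
        have h2 : List.dropWhile (fun x => !pvIsSep x)
            (PySem.Str.strip line :: List.map PySem.Str.strip rest) =
            PySem.Str.strip line :: List.map PySem.Str.strip rest := by
          simp [List.dropWhile_cons, hsep]
        rw [h1, h2, pvSGroups_cons_sep _ _ _ hsep]
        simp
    · rw [if_neg hsep]
      have hb : (!pvIsSep (PySem.Str.strip line)) = true := by simp_all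
      rw [ih (curr ++ [pvSplitA separator (PySem.Str.strip line)])]
      cases curr with
      | nil =>
        simp only [List.nil_append, pvPend]
        rw [pvSGroups_cons_content _ _ _ (by simp_all)]
        rw [List.takeWhile_cons, List.dropWhile_cons, if_pos hb, if_pos hb]
        simp
      | cons c cs =>
        simp only [pvPend, List.cons_append]
        rw [List.takeWhile_cons, List.dropWhile_cons, if_pos hb, if_pos hb]
        simp

-- takeWhile / dropWhile as take / drop of the takeWhile length
theorem pvTake_takeWhile {α : Type} (p : α → Bool) (l : List α) :
    l.take (l.takeWhile p).length = l.takeWhile p := by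
  induction l with
  | nil => simp
  | cons a as ih =>
    by_cases h : p a
    · simp [List.takeWhile_cons, h, ih]
    · simp [List.takeWhile_cons, h]

theorem pvDrop_takeWhile {α : Type} (p : α → Bool) (l : List α) :
    l.drop (l.takeWhile p).length = l.dropWhile p := by
  induction l with
  | nil => simp
  | cons a as ih =>
    by_cases h : p a
    · simp [List.takeWhile_cons, List.dropWhile_cons, h, ih]
    · simp [List.takeWhile_cons, List.dropWhile_cons, h]

-- pvBFind finds i + length of the run of 'false' entries starting at i
theorem pvBFind_char (sepAt : List Bool) (i : Nat) :
    pvBFind sepAt sepAt.length i = i + ((sepAt.drop i).takeWhile (fun b => !b)).length := by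
  fun_induction pvBFind sepAt sepAt.length i with
  | case1 j h ih =>
    obtain ⟨hj, hb⟩ := h
    have hget : sepAt[j] = false := by
      rw [← List.getD_eq_getElem sepAt true hj]; exact hb
    rw [List.drop_eq_getElem_cons hj]
    simp [List.takeWhile_cons, hget]
    omega
  | case2 j h =>
    by_cases hj : j < sepAt.length
    · have hb : sepAt.getD j true = true := by
        rcases Bool.eq_false_or_eq_true (sepAt.getD j true) with h' | h'
        · exact h'
        · exact absurd ⟨hj, h'⟩ h
      have hget : sepAt[j] = true := by
        rw [← List.getD_eq_getElem sepAt true hj]; exact hb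
      rw [List.drop_eq_getElem_cons hj, List.takeWhile_cons, hget]
      simp
    · rw [List.drop_eq_nil_of_le (by omega)]
      simp

-- main B lemma: pvBLoop from index i computes the span form of the dropped suffix
theorem pvBLoop_eq (separator : String) (lines : List String) (i : Nat) :
    pvBLoop separator lines (lines.map pvIsSep) lines.length i =
      pvSGroups separator (lines.drop i) := by
  fun_induction pvBLoop separator lines (lines.map pvIsSep) lines.length i with
  | case1 i hi hsep ih =>
    have hi' : i < (lines.map pvIsSep).length := by simpa using hi
    have hget : pvIsSep lines[i] = true := by
      have := List.getD_eq_getElem (lines.map pvIsSep) true hi'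
      rw [this.symm.trans hsep] at *
      simp_all
    rw [ih, List.drop_eq_getElem_cons hi]
    rw [pvSGroups_cons_sep _ _ _ hget]
  | case2 i hi hsep j ih =>
    have hj : j = pvBFind (List.map pvIsSep lines) lines.length i := rfl
    rw [hj] at ih
    rw [hj]
    have hi' : i < (lines.map pvIsSep).length := by simpa using hi
    have hget : pvIsSep lines[i] = false := by
      have h1 := List.getD_eq_getElem (lines.map pvIsSep) true hi'
      have h2 : (lines.map pvIsSep).getD i true = false := by simpa using hsep
      rw [h1] at h2
      simpa using h2
    have hmapdrop : (lines.map pvIsSep).drop i = (lines.drop i).map pvIsSep := by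
      simp
    have hchar : pvBFind (lines.map pvIsSep) lines.length i =
        i + ((lines.drop i).takeWhile (fun x => !pvIsSep x)).length := by
      have h3 := pvBFind_char (lines.map pvIsSep) i
      rw [List.length_map] at h3
      rw [h3, hmapdrop, List.takeWhile_map, List.length_map]
      rfl
    have hslice : PySem.List.slice lines (some (i : Int))
        (some ((pvBFind (lines.map pvIsSep) lines.length i : Nat) : Int)) =
        (lines.drop i).takeWhile (fun x => !pvIsSep x) := by
      rw [PySem.List.slice_natCast, hchar]
      have hk : i + ((lines.drop i).takeWhile (fun x => !pvIsSep x)).length - i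
          = ((lines.drop i).takeWhile (fun x => !pvIsSep x)).length := by omega
      rw [hk, pvTake_takeWhile]
    have hdrop : lines.drop (pvBFind (lines.map pvIsSep) lines.length i) =
        (lines.drop i).dropWhile (fun x => !pvIsSep x) := by
      rw [hchar, ← List.drop_drop, pvDrop_takeWhile]
    rw [ih, hdrop, hslice]
    rw [List.drop_eq_getElem_cons hi, pvSGroups_cons_content _ _ _ hget]
    rw [← List.drop_eq_getElem_cons hi]
    simp [pvSplitA]
  | case3 i hi =>
    rw [List.drop_eq_nil_of_le (by omega)]
    rw [pvSGroups_nil]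

-- ===== VERDICT (by name: the statement is the Claim_ definition above) =====
theorem conll_iterator_spec : Claim_equal_conll_iterator := by
  unfold Claim_equal_conll_iterator
  intro stream separator _ _
  unfold Spec_conll_iterator conll_iterator conll_iterator_alt
  rw [pvALoop_eq]
  simp only [pvPend]
  rw [pvBLoop_eq]
  simp
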